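-- pv_equiv track=rewrite | github.com/shanksms/python-algo-problems | searching/FacingTheSun.py | buildingWithMaxSunlight
-- ===== SOURCE A (Python) =====
-- def buildingWithMaxSunlight(a):
--
--     count = 1
--     maxHeightSeenSoFar = a[0]
--     for i in range(1, len(a)):
--         if a[i] > maxHeightSeenSoFar:
--             count += 1
--             maxHeightSeenSoFar = a[i]
--
--     return count
-- ===== SOURCE B (Python) =====
-- def buildingWithMaxSunlight(a):
--     # Build the prefix-maximum sequence, then count its distinct values.
--     pm = [a[0]]
--     for x in a[1:]:
--         pm.append(max(pm[-1], x))
--     return len(set(pm))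
-- ===== Notes on version B (the rewrite author's own statement) =====
-- stated objective: alternative
-- what changed: B builds the prefix-maximum sequence and returns the number of its distinct values, instead of A's running-maximum comparison branch with an explicit counter.
import Mathlib
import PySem

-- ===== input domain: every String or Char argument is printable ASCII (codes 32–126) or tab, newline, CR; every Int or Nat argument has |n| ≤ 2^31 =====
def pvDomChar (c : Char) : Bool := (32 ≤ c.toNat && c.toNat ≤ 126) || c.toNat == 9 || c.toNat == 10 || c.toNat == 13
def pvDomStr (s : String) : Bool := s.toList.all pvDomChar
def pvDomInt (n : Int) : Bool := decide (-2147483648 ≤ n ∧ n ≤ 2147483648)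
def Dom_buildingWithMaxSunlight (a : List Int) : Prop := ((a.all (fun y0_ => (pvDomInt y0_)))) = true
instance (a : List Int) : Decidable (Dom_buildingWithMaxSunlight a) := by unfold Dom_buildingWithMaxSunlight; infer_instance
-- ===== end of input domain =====

-- B builds the prefix-maximum sequence and counts its distinct values (len(set(...)))
-- instead of A's branch-and-counter running maximum; same O(n) cost, different decomposition.


-- ===== PORT A =====
-- the for-loop over range(1, len(a)) carrying (maxHeightSeenSoFar, count)
def pvLoopA : List Int → Int → Int → Int
  | [], _, c => c
  | x :: xs, m, c => if x > m then pvLoopA xs x (c + 1) else pvLoopA xs m c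

def buildingWithMaxSunlight (a : List Int) : Int :=
  match a with
  | [] => 0          -- a[0] raises IndexError in Python; excluded by Pre_
  | x :: xs => pvLoopA xs x 1

-- ===== PORT B =====
-- pm = [a[0]]; for x in a[1:]: pm.append(max(pm[-1], x))  (the last element pm[-1] is the parameter m)
def pvPrefixMax : List Int → Int → List Int
  | [], m => [m]
  | x :: xs, m => m :: pvPrefixMax xs (max m x)

def buildingWithMaxSunlight_alt (a : List Int) : Int :=
  match a with
  | [] => 0          -- a[0] raises IndexError in Python; excluded by Pre_
  | x :: xs => ((PySem.Set.ofList (pvPrefixMax xs x)).length : Int)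

-- ===== PRECONDITION & SPEC =====
-- A evaluates a[0], which raises IndexError on the empty list; Pre_ excludes exactly that input.
def Pre_buildingWithMaxSunlight (a : List Int) : Prop := a ≠ []
instance (a : List Int) : Decidable (Pre_buildingWithMaxSunlight a) := by
  unfold Pre_buildingWithMaxSunlight; infer_instance
def pvWitness_buildingWithMaxSunlight : List Int := [3, 1, 4, 4, 2]

def Spec_buildingWithMaxSunlight (a : List Int) (out : Int) : Prop := out = buildingWithMaxSunlight_alt a
instance (a : List Int) (out : Int) : Decidable (Spec_buildingWithMaxSunlight a out) := by
  unfold Spec_buildingWithMaxSunlight; infer_instance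

-- ===== CLAIM (what is proved, stated in full; the proofs are below) =====
def Claim_equal_buildingWithMaxSunlight : Prop := ∀ (a : List Int), Dom_buildingWithMaxSunlight a → Pre_buildingWithMaxSunlight a → Spec_buildingWithMaxSunlight a (buildingWithMaxSunlight a)

-- ===== LEMMAS AND PROOFS =====

-- every element of the prefix-maximum sequence started at m is ≥ m
lemma pvPrefixMax_lb : ∀ (xs : List Int) (m y : Int), y ∈ pvPrefixMax xs m → m ≤ y := by
  intro xs
  induction xs with
  | nil => intro m y h; simp [pvPrefixMax] at h; omega
  | cons x xs ih =>
      intro m y h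
      simp only [pvPrefixMax, List.mem_cons] at h
      rcases h with h | h
      · omega
      · have := ih (max m x) y h
        omega

lemma pvPrefixMax_head_mem : ∀ (xs : List Int) (m : Int), m ∈ pvPrefixMax xs m := by
  intro xs m
  cases xs <;> simp [pvPrefixMax]

-- length of the Python set of a list = card of its Finset of members
lemma setLen_eq_card (l : List Int) :
    ((PySem.Set.ofList l).length : Int) = ((l.toFinset.card : Nat) : Int) := by
  have hnd : (PySem.Set.ofList l).Nodup := by
    have := PySem.List.nodup_dedup (α := Int) l
    rwa [PySem.List.dedup_eq_ofList] at this
  have hfs : (PySem.Set.ofList l).toFinset = l.toFinset := by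
    apply Finset.ext
    intro y
    simp [List.mem_toFinset, PySem.Set.mem_ofList]
  have := List.toFinset_card_of_nodup hnd
  rw [hfs] at this
  exact_mod_cast this.symm

-- A's loop equals (count so far − 1) + number of distinct prefix maxima
lemma pvLoopA_eq_card : ∀ (xs : List Int) (m c : Int),
    pvLoopA xs m c = c - 1 + (((pvPrefixMax xs m).toFinset.card : Nat) : Int) := by
  intro xs
  induction xs with
  | nil => intro m c; simp [pvLoopA, pvPrefixMax]
  | cons x xs ih =>
      intro m c
      by_cases h : x > m
      · have hmax : max m x = x := by omega
        have hnotmem : m ∉ pvPrefixMax xs x := by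
          intro hmem
          have := pvPrefixMax_lb xs x m hmem
          omega
        have hcard : ((m :: pvPrefixMax xs x).toFinset.card)
            = (pvPrefixMax xs x).toFinset.card + 1 := by
          simp only [List.toFinset_cons]
          rw [Finset.card_insert_of_notMem (by simpa using hnotmem)]
        simp only [pvLoopA, pvPrefixMax, if_pos h, hmax, ih, hcard]
        push_cast
        ring
      · have hmax : max m x = m := by omega
        have hcard : ((m :: pvPrefixMax xs m).toFinset.card)
            = (pvPrefixMax xs m).toFinset.card := by
          simp only [List.toFinset_cons]
          rw [Finset.card_insert_of_mem (by simpa using pvPrefixMax_head_mem xs m)]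
        simp only [pvLoopA, pvPrefixMax, if_neg h, hmax, ih, hcard]

-- ===== VERDICT (by name: the statement is the Claim_ definition above) =====
theorem buildingWithMaxSunlight_spec : Claim_equal_buildingWithMaxSunlight := by
  intro a _ hpre
  unfold Spec_buildingWithMaxSunlight
  cases a with
  | nil => exact absurd rfl hpre
  | cons x xs =>
      show pvLoopA xs x 1 = ((PySem.Set.ofList (pvPrefixMax xs x)).length : Int)
      rw [pvLoopA_eq_card, setLen_eq_card]
      ring
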